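-- pv_equiv track=rewrite | github.com/FalaisePocket/Ada2tempo | hola.py | costo_minimo
-- ===== SOURCE A (Python) =====
-- def costo_minimo(tablones):
--
--     def calcular_costo(tablon,tiempo):
--         if (tablon[0]-tablon[1]>=tiempo):
--             return tablon[0]-(tiempo + tablon[1])
--         else:
--             return tablon[2]*((tiempo+tablon[1])-tablon[0])
--
--
--
--     # Ordenar los tablones según el criterio de costo
--     tablones_ordenados = sorted(tablones, key=lambda x: calcular_costo(x,0))
--
--     # Inicializar la tabla de memoization o tabulación
--     memo = { }
--
--     # Inicializar la tabla para almacenar las decisiones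
--     decisiones = { }
--
--     # Función de recurrencia para calcular el costo mínimo y registrar las decisiones
--     def dp(tiempo_actual, indice):
--         if indice == len(tablones):
--             return 0
--         if (tiempo_actual, indice) in memo:
--             return memo[(tiempo_actual, indice)]
--
--         tablon_actual = tablones[indice]
--         costo_regar = calcular_costo(tablon_actual, tiempo_actual) + dp(tiempo_actual + tablon_actual[1], indice + 1)
--         costo_no_regar = dp(tiempo_actual, indice + 1)
--
--         if costo_regar < costo_no_regar:
--             decisiones[(tiempo_actual, indice)] = True  # Regar el tablón actual
--         else:
--             decisiones[(tiempo_actual, indice)] = False  # No regar el tablón actual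
--
--         memo[(tiempo_actual, indice)] = min(costo_regar, costo_no_regar)
--         return memo[(tiempo_actual, indice)]
--
--     # Llamar a la función de recurrencia
--     costo_total = dp(0, 0)
--
--     # Reconstruir el orden de los tablones
--     orden_tablones = []
--     tiempo_actual = 0
--     indice = 0
--     while indice < len(tablones):
--         if decisiones[(tiempo_actual, indice)]:
--             orden_tablones.append(tablones[indice])
--             tiempo_actual += tablones[indice][1]
--         indice += 1
--
--     return costo_total, orden_tablones
-- ===== SOURCE B (Python) =====
-- def costo_minimo(tablones):
--     def calcular_costo(tablon, tiempo):
--         if tablon[0] - tablon[1] >= tiempo: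
--             return tablon[0] - (tiempo + tablon[1])
--         else:
--             return tablon[2] * ((tiempo + tablon[1]) - tablon[0])
--
--     # kept from A (its result is unused there too)
--     sorted(tablones, key=lambda x: calcular_costo(x, 0))
--
--     memo = {}
--
--     # dp returns (minimal cost, list of watered planks) directly
--     def dp(tiempo, indice):
--         if indice == len(tablones):
--             return 0, []
--         if (tiempo, indice) in memo:
--             return memo[(tiempo, indice)]
--         tablon = tablones[indice]
--         cr, orden_r = dp(tiempo + tablon[1], indice + 1)
--         costo_regar = calcular_costo(tablon, tiempo) + cr
--         costo_no_regar, orden_n = dp(tiempo, indice + 1)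
--         if costo_regar < costo_no_regar:
--             res = (costo_regar, [tablon] + orden_r)
--         else:
--             res = (costo_no_regar, orden_n)
--         memo[(tiempo, indice)] = res
--         return res
--
--     costo, orden = dp(0, 0)
--     return costo, orden
-- ===== Notes on version B (the rewrite author's own statement) =====
-- stated objective: simpler
-- what changed: Replaced A's memo/decisiones split and the separate while-loop replay with a single memoized recursion dp(tiempo, indice) that returns the (cost, chosen-planks) pair directly.
import Mathlib
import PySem

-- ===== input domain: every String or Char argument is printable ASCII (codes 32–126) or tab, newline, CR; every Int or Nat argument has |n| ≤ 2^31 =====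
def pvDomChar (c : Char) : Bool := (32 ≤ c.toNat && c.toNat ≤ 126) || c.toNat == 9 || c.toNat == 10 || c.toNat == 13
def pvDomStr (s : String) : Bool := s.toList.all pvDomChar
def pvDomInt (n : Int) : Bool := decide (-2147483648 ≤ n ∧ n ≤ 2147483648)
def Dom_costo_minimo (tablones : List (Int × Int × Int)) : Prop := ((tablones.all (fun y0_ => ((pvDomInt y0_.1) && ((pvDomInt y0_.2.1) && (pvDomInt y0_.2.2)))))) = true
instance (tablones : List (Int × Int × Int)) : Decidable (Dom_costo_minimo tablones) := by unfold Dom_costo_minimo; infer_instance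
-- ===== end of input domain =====

-- B replaces A's memo/decisiones split and while-loop replay by one recursion returning
-- the (cost, chosen planks) pair directly (objective: simpler; A's memo dict is a pure
-- cache, so both ports are the plain recursions).

-- ===== PORT A =====
-- calcular_costo(tablon, tiempo)
def pvCalcCosto (t : Int × Int × Int) (tiempo : Int) : Int :=
  if t.1 - t.2.1 ≥ tiempo then t.1 - (tiempo + t.2.1)
  else t.2.2 * ((tiempo + t.2.1) - t.1)

-- A's dp(tiempo, indice): recursion over the suffix tablones[indice:]; the memo dict is
-- a pure cache and does not change the value, so it is ported as the bare recursion.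
def pvDpA (tiempo : Int) : List (Int × Int × Int) → Int
  | [] => 0
  | t :: rest =>
      let costo_regar := pvCalcCosto t tiempo + pvDpA (tiempo + t.2.1) rest
      let costo_no_regar := pvDpA tiempo rest
      min costo_regar costo_no_regar

-- A's while-loop reconstruction: at each index it reads decisiones[(tiempo, indice)],
-- i.e. whether costo_regar < costo_no_regar held at that state.
def pvReconA (tiempo : Int) : List (Int × Int × Int) → List (Int × Int × Int)
  | [] => []
  | t :: rest =>
      if pvCalcCosto t tiempo + pvDpA (tiempo + t.2.1) rest < pvDpA tiempo rest then
        t :: pvReconA (tiempo + t.2.1) rest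
      else
        pvReconA tiempo rest

def costo_minimo (tablones : List (Int × Int × Int)) : Int × (List (Int × Int × Int)) :=
  -- dead 'sorted(...)' call of A (its result is unused)
  let _tablones_ordenados := PySem.List.sorted tablones (key := fun x => pvCalcCosto x 0)
  (pvDpA 0 tablones, pvReconA 0 tablones)

-- ===== PORT B =====
-- B's dp(tiempo, indice): returns the (cost, watered-plank list) pair directly.
def pvDpB (tiempo : Int) : List (Int × Int × Int) → Int × List (Int × Int × Int)
  | [] => (0, [])
  | t :: rest =>
      let r := pvDpB (tiempo + t.2.1) rest
      let costo_regar := pvCalcCosto t tiempo + r.1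
      let s := pvDpB tiempo rest
      if costo_regar < s.1 then (costo_regar, t :: r.2) else s

def costo_minimo_alt (tablones : List (Int × Int × Int)) : Int × (List (Int × Int × Int)) :=
  let _orden_muerto := PySem.List.sorted tablones (key := fun x => pvCalcCosto x 0)
  pvDpB 0 tablones

-- ===== PRECONDITION & SPEC =====
def Spec_costo_minimo (tablones : List (Int × Int × Int)) (out : Int × (List (Int × Int × Int))) : Prop := out = costo_minimo_alt tablones
instance (tablones : List (Int × Int × Int)) (out : Int × (List (Int × Int × Int))) : Decidable (Spec_costo_minimo tablones out) := by unfold Spec_costo_minimo; infer_instance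

-- ===== CLAIM (what is proved, stated in full; the proofs are below) =====
def Claim_equal_costo_minimo : Prop := ∀ (tablones : List (Int × Int × Int)), Dom_costo_minimo tablones → Spec_costo_minimo tablones (costo_minimo tablones)

-- ===== LEMMAS AND PROOFS =====
theorem pvDpB_eq (l : List (Int × Int × Int)) : ∀ tiempo : Int,
    pvDpB tiempo l = (pvDpA tiempo l, pvReconA tiempo l) := by
  induction l with
  | nil => intro tiempo; simp [pvDpA, pvDpB, pvReconA]
  | cons t rest ih =>
      intro tiempo
      simp only [pvDpA, pvDpB, pvReconA, ih]
      split_ifs with h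
      · simp [min_eq_left (le_of_lt h)]
      · simp [min_eq_right (le_of_not_gt h)]

-- ===== VERDICT (by name: the statement is the Claim_ definition above) =====
theorem costo_minimo_spec : Claim_equal_costo_minimo := by
  intro tablones _
  unfold Spec_costo_minimo costo_minimo costo_minimo_alt
  simp [pvDpB_eq]
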